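-- pv_equiv track=rewrite | github.com/Pafez/Python_OLD | MathPop/$Multiplicative Persistence.py | mp
-- ===== SOURCE A (Python) =====
-- def mul(n):
--     digits = list(str(n))
--     new = 1
--     for i in digits:
--         new = new*int(i)
--     return new
--
-- def mp(num):
--     n = num
--     ans = []
--     while True:
--         ans.append(mul(n))
--         if len(str(mul(n))) == 1:
--             return ans
--         n = mul(n)
-- ===== SOURCE B (Python) =====
-- def digprod(n):
--     if n < 10:
--         return n
--     p = 1
--     while n:
--         p *= n % 10
--         n //= 10
--     return p
--
-- def mp(num):
--     p = digprod(num)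
--     if p < 10:
--         return [p]
--     return [p] + mp(p)
-- ===== Notes on version B (the rewrite author's own statement) =====
-- stated objective: alternative
-- what changed: B computes each digit product once with pure integer arithmetic (modulo and floor division) and recurses on the product sequence, instead of A's while-loop that converts each value to a string and back and calls mul three times per iteration.
import Mathlib
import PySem

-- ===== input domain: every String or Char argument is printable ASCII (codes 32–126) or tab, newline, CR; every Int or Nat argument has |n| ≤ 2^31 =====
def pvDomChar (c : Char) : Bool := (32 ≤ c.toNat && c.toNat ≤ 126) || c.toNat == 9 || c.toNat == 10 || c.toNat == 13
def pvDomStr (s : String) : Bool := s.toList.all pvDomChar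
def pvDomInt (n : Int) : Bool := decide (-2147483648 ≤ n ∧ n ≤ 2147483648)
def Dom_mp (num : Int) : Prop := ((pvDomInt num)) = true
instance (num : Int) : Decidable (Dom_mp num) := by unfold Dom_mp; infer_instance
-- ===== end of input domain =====

-- B replaces A's string-based digit products (str/int round trips, mul called three
-- times per iteration) by pure integer arithmetic and a recursion on the product
-- sequence, computing each digit product once: a different algorithm, same cost class.

-- ===== PORT A =====
-- int(i) for the one-character strings i of list(str(n)); the default 1 is reached only
-- where Python's int() raises ValueError (the '-' of a negative n), excluded by Pre_mp.
def intCharD (c : Char) : Int := (PySem.Int.ofChars? [c]).getD 1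

-- mul(n): new = 1; for i in list(str(n)): new = new * int(i)
def mulA (n : Int) : Int :=
  (PySem.Int.toChars n).foldl (fun new i => new * intCharD i) 1

-- the 'while True' loop of A's mp, made total with fuel; mpLoop_eq_mpAltGo below shows
-- the fuel mp supplies is never exhausted on Pre_mp inputs.
def mpLoop : Nat → Int → List Int → List Int
  | 0, _, ans => ans
  | f + 1, n, ans =>
    let ans' := ans ++ [mulA n]
    if (PySem.Int.toChars (mulA n)).length = 1 then ans'
    else mpLoop f (mulA n) ans'

def mp (num : Int) : List Int := mpLoop (num.natAbs + 1) num []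

-- ===== PORT B =====
-- the 'while n:' loop of digprod, made total with fuel (n.toNat iterations always
-- suffice: dpLoop_eq below); the guard n ≤ 0 (Python: n == 0) only totalises the loop,
-- which is entered only with n ≥ 10, where the trajectory never goes negative.
def dpLoop : Nat → Int → Int → Int
  | 0, p, _ => p
  | f + 1, p, n =>
    if n ≤ 0 then p
    else dpLoop f (p * PySem.Int.mod n 10) (PySem.Int.floordiv n 10)

-- digprod(n): if n < 10: return n; p = 1; while n: p *= n % 10; n //= 10; return p
def digprod (n : Int) : Int := if n < 10 then n else dpLoop n.toNat 1 n

-- the recursion of B's mp, made total with fuel (never exhausted: mpLoop_eq_mpAltGo)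
def mpAltGo : Nat → Int → List Int
  | 0, _ => []
  | f + 1, num =>
    let p := digprod num
    if p < 10 then [p] else [p] ++ mpAltGo f p

def mp_alt (num : Int) : List Int := mpAltGo (num.natAbs + 1) num

-- ===== PRECONDITION & SPEC =====
-- Pre_mp excludes exactly the inputs on which Python's A raises: for num < 0, str(n)
-- starts with '-' and int('-') raises ValueError inside mul.
def Pre_mp (num : Int) : Prop := 0 ≤ num
instance (num : Int) : Decidable (Pre_mp num) := by unfold Pre_mp; infer_instance
def pvWitness_mp : Int := 39

def Spec_mp (num : Int) (out : List Int) : Prop := out = mp_alt num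
instance (num : Int) (out : List Int) : Decidable (Spec_mp num out) := by unfold Spec_mp; infer_instance

-- ===== CLAIM (what is proved, stated in full; the proofs are below) =====
def Claim_equal_mp : Prop := ∀ (num : Int), Dom_mp num → Pre_mp num → Spec_mp num (mp num)

-- ===== LEMMAS AND PROOFS =====

-- the digit product of a Nat: reference value both ports are reduced to
def prodNat (m : Nat) : Nat :=
  if _h : m < 10 then m else prodNat (m / 10) * (m % 10)
decreasing_by exact Nat.div_lt_self (by omega) (by omega)

theorem prodNat_le (m : Nat) : prodNat m ≤ m := by
  induction m using Nat.strong_induction_on with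
  | _ m ih =>
    rw [prodNat]
    split
    · exact le_refl m
    · rename_i h
      have h10 : 10 ≤ m := by omega
      calc prodNat (m / 10) * (m % 10) ≤ (m / 10) * (m % 10) :=
            Nat.mul_le_mul_right _ (ih (m / 10) (by omega))
        _ ≤ (m / 10) * 9 := Nat.mul_le_mul_left _ (by omega)
        _ ≤ m := by omega

theorem prodNat_lt (m : Nat) (h : 10 ≤ m) : prodNat m < m := by
  rw [prodNat]
  split
  · omega
  · calc prodNat (m / 10) * (m % 10) ≤ (m / 10) * (m % 10) :=
          Nat.mul_le_mul_right _ (prodNat_le (m / 10))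
      _ ≤ (m / 10) * 9 := Nat.mul_le_mul_left _ (by omega)
      _ < m := by omega

theorem dpLoop_zero (f : Nat) (p : Int) : dpLoop f p 0 = p := by
  cases f <;> simp [dpLoop]

theorem dpLoop_eq (f : Nat) : ∀ (m : Nat) (p : Int), 0 < m → m ≤ f →
    dpLoop f p (m : Int) = p * (prodNat m : Int) := by
  induction f with
  | zero => intro m p hm hf; omega
  | succ f ih =>
    intro m p hm hf
    rw [dpLoop, if_neg (by omega : ¬ ((m : Int) ≤ 0))]
    have hmod : PySem.Int.mod (m : Int) 10 = ((m % 10 : Nat) : Int) := by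
      rw [PySem.Int.mod_eq_emod_of_pos (by omega : (0:Int) < 10)]; omega
    have hdiv : PySem.Int.floordiv (m : Int) 10 = ((m / 10 : Nat) : Int) := by
      rw [PySem.Int.floordiv_eq_ediv_of_pos (by omega : (0:Int) < 10)]; omega
    rw [hmod, hdiv]
    by_cases h10 : m < 10
    · have hz : m / 10 = 0 := by omega
      rw [hz]
      rw [(by omega : ((0 : Nat) : Int) = 0), dpLoop_zero]
      have h1 : m % 10 = m := by omega
      have h2 : prodNat m = m := by rw [prodNat, dif_pos h10]
      rw [h1, h2]
    · rw [ih (m / 10) _ (by omega) (by omega)]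
      have hp : prodNat m = prodNat (m / 10) * (m % 10) := by rw [prodNat, dif_neg h10]
      rw [hp]
      push_cast
      ring

theorem digprod_eq (n : Int) (h : 0 ≤ n) : digprod n = (prodNat n.toNat : Int) := by
  rw [digprod]
  by_cases h10 : n < 10
  · rw [if_pos h10, prodNat, dif_pos (by omega)]
    omega
  · rw [if_neg h10]
    obtain ⟨m, rfl⟩ : ∃ m : Nat, n = (m : Int) := ⟨n.toNat, by omega⟩
    rw [Int.toNat_natCast, dpLoop_eq m m 1 (by omega) (le_refl m), one_mul]

theorem digprod_lt (n : Int) (h : 10 ≤ n) : digprod n < n := by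
  rw [digprod_eq n (by omega)]
  have := prodNat_lt n.toNat (by omega)
  omega

-- big-endian decimal digit characters of a Nat (proof-side mirror of Nat.toDigits 10)
def digitsChars (n : Nat) : List Char :=
  if _h : n < 10 then [Nat.digitChar n] else digitsChars (n / 10) ++ [Nat.digitChar (n % 10)]
decreasing_by exact Nat.div_lt_self (by omega) (by omega)

theorem toDigitsCore_eq_digitsChars :
    ∀ (f n : Nat) (acc : List Char), n < f →
      Nat.toDigitsCore 10 f n acc = digitsChars n ++ acc := by
  intro f
  induction f with
  | zero => intro n acc h; omega
  | succ f ih =>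
    intro n acc h
    rw [Nat.toDigitsCore]
    by_cases hz : n / 10 = 0
    · rw [if_pos hz, digitsChars, dif_pos (by omega)]
      have h1 : n % 10 = n := by omega
      rw [h1]; rfl
    · have hlt : n / 10 < f := lt_of_lt_of_le (Nat.div_lt_self (by omega) (by omega)) (by omega)
      rw [if_neg hz, ih (n / 10) _ hlt]
      have hd : digitsChars n = digitsChars (n / 10) ++ [Nat.digitChar (n % 10)] := by
        rw [digitsChars, dif_neg (by omega)]
      rw [hd]
      simp

theorem toDigits_eq (n : Nat) : Nat.toDigits 10 n = digitsChars n := by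
  have := toDigitsCore_eq_digitsChars (n + 1) n [] (by omega)
  simpa [Nat.toDigits] using this

theorem toChars_nonneg (n : Int) (h : 0 ≤ n) :
    PySem.Int.toChars n = digitsChars n.toNat := by
  rw [PySem.Int.toChars, if_neg (by omega), toDigits_eq]

theorem intCharD_digitChar (d : Nat) (hd : d < 10) :
    intCharD (Nat.digitChar d) = (d : Int) := by
  interval_cases d <;> decide

theorem digitsChars_length_pos (n : Nat) : 0 < (digitsChars n).length := by
  rw [digitsChars]
  split <;> simp

theorem digitsChars_length_eq_one (n : Nat) : (digitsChars n).length = 1 ↔ n < 10 := by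
  constructor
  · intro h
    by_contra hge
    rw [digitsChars, dif_neg hge, List.length_append] at h
    have := digitsChars_length_pos (n / 10)
    simp only [List.length_singleton] at h
    omega
  · intro h
    rw [digitsChars, dif_pos h]
    rfl

theorem foldl_digitsChars (n : Nat) :
    ∀ a : Int, (digitsChars n).foldl (fun acc c => acc * intCharD c) a = a * (prodNat n : Int) := by
  induction n using Nat.strong_induction_on with
  | _ n ih =>
    intro a
    by_cases h : n < 10
    · rw [digitsChars, dif_pos h]
      simp only [List.foldl]
      rw [intCharD_digitChar n h]
      have h2 : prodNat n = n := by rw [prodNat, dif_pos h]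
      rw [h2]
    · rw [digitsChars, dif_neg h, List.foldl_append,
        ih (n / 10) (Nat.div_lt_self (by omega) (by omega)) a]
      simp only [List.foldl]
      rw [intCharD_digitChar (n % 10) (by omega)]
      have hp : prodNat n = prodNat (n / 10) * (n % 10) := by rw [prodNat, dif_neg h]
      rw [hp]
      push_cast
      ring

theorem mulA_eq (n : Int) (h : 0 ≤ n) : mulA n = digprod n := by
  rw [mulA, toChars_nonneg n h, foldl_digitsChars, one_mul, digprod_eq n h]

theorem digprod_nonneg (n : Int) (h : 0 ≤ n) : 0 ≤ digprod n := by
  rw [digprod_eq n h]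
  positivity

theorem mpLoop_eq_mpAltGo :
    ∀ (f : Nat) (n : Int) (ans : List Int), 0 ≤ n → n.toNat < f →
      mpLoop f n ans = ans ++ mpAltGo f n := by
  intro f
  induction f with
  | zero => intro n ans _ h; omega
  | succ f ih =>
    intro n ans hn hf
    have hAB : mulA n = digprod n := mulA_eq n hn
    have hp0 : 0 ≤ digprod n := digprod_nonneg n hn
    have hlen : (PySem.Int.toChars (mulA n)).length = 1 ↔ digprod n < 10 := by
      rw [hAB, toChars_nonneg _ hp0, digitsChars_length_eq_one]
      omega
    rw [mpLoop, mpAltGo]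
    by_cases hsmall : digprod n < 10
    · rw [if_pos (hlen.mpr hsmall), hAB]
      simp [hsmall]
    · rw [if_neg (fun hc => hsmall (hlen.mp hc)), hAB]
      have h10 : 10 ≤ n := by
        by_contra hc
        exact hsmall (by rw [digprod, if_pos (by omega)]; omega)
      have hlt : digprod n < n := digprod_lt n h10
      rw [ih (digprod n) (ans ++ [digprod n]) hp0 (by omega)]
      simp [hsmall]

-- ===== VERDICT (by name: the statement is the Claim_ definition above) =====
theorem mp_spec : Claim_equal_mp := by
  intro num _ hpre
  unfold Spec_mp mp mp_alt
  rw [mpLoop_eq_mpAltGo (num.natAbs + 1) num [] hpre (by omega)]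
  rfl
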